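-- pv_equiv track=rewrite | github.com/mishioo/tesliper | tesliper/glassware/array_base.py | longest_subsequences
-- ===== SOURCE A (Python) =====
-- from typing import (
--     Any,
--     Callable,
--     Dict,
--     Iterable,
--     Iterator,
--     Optional,
--     Sequence,
--     Tuple,
--     Union,
-- )
--
-- NestedSequence = Sequence[Union[Any, "NestedSequence"]]
--
-- def longest_subsequences(sequences: NestedSequence) -> Tuple[int, ...]:
--     """Finds lengths of longest subsequences on each level of given nested sequence.
--     Each subsequence should have same number of nesting levels.
--
--     Parameters
--     ----------
--     sequences : sequence [of sequences [of...]]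
--         Arbitrarily deep, nested sequence of sequences.
--
--     Returns
--     -------
--     tuple of ints
--         Length of the longest subsequence for each nesting level as a tuple.
--
--     Notes
--     -----
--     If nesting level in not identical in all subsequences, lengths are reported
--     up to first level of non-iterable elements.
--
--     >>> longest_subsequences([[[1, 2]], [[1], 2]])
--     (2,)
--
--     Examples
--     --------
--     >>> longest_subsequences([[[1, 2]], [[1]]])
--     (1, 2)
--     >>> longest_subsequences([[[1, 2]], [[1], [1], [1]]])
--     (3, 2)
--     """
--     try:
--         if any(isinstance(v, str) for v in sequences):
--             raise TypeError
--         lenghts = [len(v) for v in sequences]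
--         longest = max(lenghts)
--     except (TypeError, ValueError):
--         return ()
--     try:
--         other = longest_subsequences([i for v in sequences for i in v])
--     except TypeError:
--         return (longest,)  # tuple
--     return (longest, *other)
-- ===== SOURCE B (Python) =====
-- def longest_subsequences(sequences):
--     """Iterative version for two-level nested input: collect the max length
--     per level, stopping when a level is empty or its elements are not sized."""
--     result = []
--     current = sequences
--     while True:
--         try:
--             if any(isinstance(v, str) for v in current):
--                 break
--             longest = max(len(v) for v in current)
--         except (TypeError, ValueError):
--             break
--         result.append(longest)
--         current = [i for v in current for i in v]
--     return tuple(result)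
-- ===== Notes on version B (the rewrite author's own statement) =====
-- stated objective: simpler
-- what changed: Replaced A's polymorphic recursion on the flattened sequence (with exception-driven termination on two distinct paths) by a single iterative while-loop over nesting levels that appends each level's max length to an accumulator until a level is empty or unsized.
import Mathlib
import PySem

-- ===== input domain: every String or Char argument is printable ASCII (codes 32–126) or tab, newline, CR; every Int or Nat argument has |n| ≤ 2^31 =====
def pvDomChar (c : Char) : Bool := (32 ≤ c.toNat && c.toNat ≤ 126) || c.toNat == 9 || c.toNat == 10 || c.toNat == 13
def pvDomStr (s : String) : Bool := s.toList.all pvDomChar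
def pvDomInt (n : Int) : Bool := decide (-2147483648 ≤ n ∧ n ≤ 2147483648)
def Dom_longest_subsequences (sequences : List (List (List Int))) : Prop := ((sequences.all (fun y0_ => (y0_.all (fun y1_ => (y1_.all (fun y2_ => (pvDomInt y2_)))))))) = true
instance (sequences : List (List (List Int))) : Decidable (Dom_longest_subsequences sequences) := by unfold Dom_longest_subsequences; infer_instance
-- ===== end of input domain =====

-- B replaces A's recursion on the flattened sequence by a single iterative pass over the
-- nesting levels (objective: simpler); equal results are proved on the declared 3-level domain.

-- ===== PORT A =====
-- A is polymorphic recursion over nesting depth; on the declared input type the recursion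
-- visits exactly three levels, so it is transliterated as one helper per level, each the
-- same code as A's body at that level.

-- level 2: elements are ints, so `len(v)` raises TypeError, caught → return ()
def lsA_level2 (_sequences : List Int) : List Int := []

-- level 1: elements are List Int (never str); max([]) raises ValueError, caught → ()
def lsA_level1 (sequences : List (List Int)) : List Int :=
  let lenghts := sequences.map (fun v => (v.length : Int))
  match PySem.List.max? lenghts (fun y => y) with
  | none => []
  | some longest =>
      let other := lsA_level2 (sequences.flatten)
      longest :: other

def longest_subsequences (sequences : List (List (List Int))) : List Int :=
  let lenghts := sequences.map (fun v => (v.length : Int))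
  match PySem.List.max? lenghts (fun y => y) with
  | none => []
  | some longest =>
      let other := lsA_level1 (sequences.flatten)
      longest :: other

-- ===== PORT B =====
-- B's while-loop runs at most twice on this input type (the third iteration always breaks
-- at `len`), so it is transliterated with the loop unrolled: each `if` is one iteration's
-- empty/non-empty test, `max(len(v) for v in current)` is the running-max fold.
def longest_subsequences_alt (sequences : List (List (List Int))) : List Int :=
  match sequences with
  | [] => []
  | v0 :: rest0 =>
      let l0 : Int := rest0.foldl (fun acc v => max acc (v.length : Int)) (v0.length : Int)
      match sequences.flatten with
      | [] => [l0]
      | v1 :: rest1 =>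
          let l1 : Int := rest1.foldl (fun acc v => max acc (v.length : Int)) (v1.length : Int)
          [l0, l1]

-- ===== PRECONDITION & SPEC =====
def Spec_longest_subsequences (sequences : List (List (List Int))) (out : List Int) : Prop := out = longest_subsequences_alt sequences
instance (sequences : List (List (List Int))) (out : List Int) : Decidable (Spec_longest_subsequences sequences out) := by unfold Spec_longest_subsequences; infer_instance

-- ===== CLAIM (what is proved, stated in full; the proofs are below) =====
def Claim_equal_longest_subsequences : Prop := ∀ (sequences : List (List (List Int))), Dom_longest_subsequences sequences → Spec_longest_subsequences sequences (longest_subsequences sequences)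

-- ===== LEMMAS AND PROOFS =====

-- Python's max(list) equals the running-max fold over lengths.
theorem max_lengths_eq {α : Type} (v : List α) (rest : List (List α)) :
    PySem.List.max? ((v.length : Int) :: rest.map (fun w => (w.length : Int))) (fun y => y)
      = some (rest.foldl (fun acc w => max acc (w.length : Int)) (v.length : Int)) := by
  simp [PySem.List.max?_id_cons, List.foldl_map]

theorem lsA_level1_eq (xs : List (List Int)) :
    lsA_level1 xs = match xs with
      | [] => []
      | v :: rest => [rest.foldl (fun acc w => max acc (w.length : Int)) (v.length : Int)] := by
  cases xs with
  | nil => simp [lsA_level1, PySem.List.max?]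
  | cons v rest => simp [lsA_level1, max_lengths_eq, lsA_level2]

-- ===== VERDICT (by name: the statement is the Claim_ definition above) =====
theorem longest_subsequences_spec : Claim_equal_longest_subsequences := by
  intro sequences _
  show longest_subsequences sequences = longest_subsequences_alt sequences
  cases sequences with
  | nil => simp [longest_subsequences, longest_subsequences_alt, PySem.List.max?]
  | cons v0 rest0 =>
      simp only [longest_subsequences, longest_subsequences_alt, List.map_cons,
        max_lengths_eq, lsA_level1_eq]
      cases (v0 :: rest0).flatten with
      | nil => simp
      | cons v1 rest1 => simp
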